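-- pv_equiv track=rewrite | github.com/bandofpv/EW309 | MILESTONES/deadzone/find_deadzone_data_analysis.py | find_peak_indices
-- ===== SOURCE A (Python) =====
-- def find_peak_indices(data, threshold):
--     indices = []
--     in_bump = False
--     for i in range(len(data)):
--         if abs(data[i]) > threshold:  # check for values above threshold in deg/s
--             if not in_bump:
--                 in_bump = True
--         elif in_bump:
--             end_index = i-1
--             indices.append(end_index)  # add some padding
--             in_bump = False
--     indices.append(len(data)-1)  # add final index value
--     return indices
-- ===== SOURCE B (Python) =====
-- def find_peak_indices(data, threshold):
--     # Run-length decomposition: split data into maximal runs of constant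
--     # above/below-threshold status; every above-run that is not the final run
--     # ends at a falling edge and contributes its last index; then append the
--     # final index of the data.
--     n = len(data)
--     runs = []  # (status, exclusive end index) of each maximal run
--     j = 0
--     while j < n:
--         status = abs(data[j]) > threshold
--         k = j + 1
--         while k < n and (abs(data[k]) > threshold) == status:
--             k += 1
--         runs.append((status, k))
--         j = k
--     out = [end - 1 for (status, end) in runs[:-1] if status]
--     return out + [n - 1]
-- ===== Notes on version B (the rewrite author's own statement) =====
-- stated objective: alternative
-- what changed: Replaced A's single-pass in_bump flag machine with a run-length decomposition: a nested-while pass groups data into maximal runs of constant above/below-threshold status, then the end indices of all non-final above-runs are extracted from the run list.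
import Mathlib
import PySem

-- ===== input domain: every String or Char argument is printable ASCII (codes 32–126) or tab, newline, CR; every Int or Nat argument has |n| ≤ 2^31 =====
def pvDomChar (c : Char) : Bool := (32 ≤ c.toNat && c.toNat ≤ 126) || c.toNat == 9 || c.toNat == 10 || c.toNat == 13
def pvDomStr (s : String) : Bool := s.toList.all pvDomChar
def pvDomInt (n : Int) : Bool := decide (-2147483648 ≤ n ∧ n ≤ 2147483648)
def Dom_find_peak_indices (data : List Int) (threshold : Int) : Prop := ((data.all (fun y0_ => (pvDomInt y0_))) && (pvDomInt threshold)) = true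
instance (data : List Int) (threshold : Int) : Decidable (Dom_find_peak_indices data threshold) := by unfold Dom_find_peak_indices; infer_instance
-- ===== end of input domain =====

-- B replaces A's single-pass in_bump flag machine by a run-length decomposition:
-- group the data into maximal runs of constant above/below-threshold status, then
-- read the answer off the run list (alternative decomposition, same cost).

-- ===== PORT A =====
-- literal transliteration of A: indexed loop with (indices, in_bump) state
def find_peak_indices (data : List Int) (threshold : Int) : List Int :=
  let st := (PySem.List.pyRange 0 (data.length : Int) 1).foldl
    (fun (st : List Int × Bool) i =>
      if |PySem.List.pyGetD data i 0| > threshold then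
        (if !st.2 then (st.1, true) else st)
      else if st.2 then (st.1 ++ [i - 1], false)
      else st)
    ([], false)
  st.1 ++ [(data.length : Int) - 1]

-- ===== PORT B =====
-- B's inner while loop: advance k while k < n and status at k equals `status`
-- (fuel only makes the recursion structural; with fuel = len(data) it never runs out,
--  and indices are Nats produced by the loop itself and stay in range, so getD is exact)
def runEndB (data : List Int) (threshold : Int) (status : Bool) (fuel k : Nat) : Nat :=
  match fuel with
  | 0 => k
  | fuel + 1 =>
    if k < data.length ∧ (decide (|data.getD k 0| > threshold) = status) then
      runEndB data threshold status fuel (k + 1)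
    else k

-- B's outer while loop: collect (status, exclusive end) of each maximal run from j
def runsB (data : List Int) (threshold : Int) (fuel j : Nat) : List (Bool × Nat) :=
  match fuel with
  | 0 => []
  | fuel + 1 =>
    if j < data.length then
      let status := decide (|data.getD j 0| > threshold)
      let k := runEndB data threshold status data.length (j + 1)
      (status, k) :: runsB data threshold fuel k
    else []

-- literal transliteration of B: build runs, then filter/map the non-final above-runs
def find_peak_indices_alt (data : List Int) (threshold : Int) : List Int :=
  let n := data.length
  let rs := runsB data threshold n 0
  let out := (rs.dropLast.filter (fun r => r.1)).map (fun r => (r.2 : Int) - 1)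
  out ++ [(n : Int) - 1]

-- ===== PRECONDITION & SPEC =====
def Spec_find_peak_indices (data : List Int) (threshold : Int) (out : List Int) : Prop := out = find_peak_indices_alt data threshold
instance (data : List Int) (threshold : Int) (out : List Int) : Decidable (Spec_find_peak_indices data threshold out) := by unfold Spec_find_peak_indices; infer_instance

-- ===== CLAIM (what is proved, stated in full; the proofs are below) =====
def Claim_equal_find_peak_indices : Prop := ∀ (data : List Int) (threshold : Int), Dom_find_peak_indices data threshold → Spec_find_peak_indices data threshold (find_peak_indices data threshold)

-- ===== LEMMAS AND PROOFS =====

-- "above threshold" at Nat index m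
def abv (data : List Int) (t : Int) (m : Nat) : Bool := decide (|data.getD m 0| > t)

-- the canonical falling-edge list from position p: indices m < n-1 with abv m ∧ ¬abv (m+1)
def edges (data : List Int) (t : Int) (p : Nat) : List Int :=
  ((List.range' p (data.length - 1 - p)).filter
    (fun m => abv data t m && !abv data t (m + 1))).map Int.ofNat

-- A's loop from Int index j with state st
def loopAfrom (data : List Int) (t : Int) (j : Int) (st : List Int × Bool) : List Int × Bool :=
  (PySem.List.pyRange j (data.length : Int) 1).foldl
    (fun (st : List Int × Bool) i =>
      if |PySem.List.pyGetD data i 0| > t then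
        (if !st.2 then (st.1, true) else st)
      else if st.2 then (st.1 ++ [i - 1], false)
      else st)
    st

theorem loopAfrom_step (data : List Int) (t : Int) (j : Nat) (h : j < data.length)
    (acc : List Int) (b : Bool) :
    loopAfrom data t (j : Int) (acc, b)
      = loopAfrom data t ((j : Int) + 1)
          (acc ++ (if b && !abv data t j then [(j : Int) - 1] else []), abv data t j) := by
  unfold loopAfrom
  rw [PySem.List.pyRange_one_cons (by exact_mod_cast h)]
  rw [List.foldl_cons]
  congr 1
  rw [PySem.List.pyGetD_natCast]
  unfold abv
  by_cases hx : |data.getD j 0| > t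
  · rw [if_pos hx, decide_eq_true hx]
    cases b <;> simp
  · rw [if_neg hx, decide_eq_false hx]
    cases b <;> simp

-- A's loop invariant: from index j ≥ 1 with in_bump = abv (j-1), the appended
-- values are exactly the falling edges from j-1 on
theorem loopAfrom_inv (data : List Int) (t : Int) :
    ∀ d j acc, j + d = data.length → 1 ≤ j →
      (loopAfrom data t (j : Int) (acc, abv data t (j - 1))).1 = acc ++ edges data t (j - 1) := by
  intro d
  induction d with
  | zero =>
    intro j acc hj h1
    unfold loopAfrom edges
    rw [PySem.List.pyRange_one_eq_nil (by omega)]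
    simp [show data.length - 1 - (j - 1) = 0 by omega]
  | succ d ih =>
    intro j acc hj h1
    have hjlt : j < data.length := by omega
    rw [loopAfrom_step data t j hjlt,
        show ((j : Int) + 1) = ((j + 1 : Nat) : Int) from by push_cast; ring]
    have hih := ih (j + 1)
      (acc ++ if (abv data t (j - 1) && !abv data t j) = true then [(j : Int) - 1] else [])
      (by omega) (by omega)
    rw [Nat.add_sub_cancel] at hih
    rw [show abv data t ((j : Nat)) = abv data t ((j + 1) - 1) from by
          rw [Nat.add_sub_cancel]] at hih ⊢
    rw [hih, List.append_assoc]
    congr 1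
    symm
    unfold edges
    rw [show data.length - 1 - (j - 1) = (data.length - 1 - j) + 1 from by omega,
        List.range'_succ]
    simp only [List.filter_cons]
    rw [show (j - 1) + 1 = j from by omega, Nat.add_sub_cancel]
    by_cases hc : (abv data t (j - 1) && !abv data t j) = true
    · rw [if_pos hc, if_pos hc, List.map_cons,
          show Int.ofNat (j - 1) = (j : Int) - 1 from by simp only [Int.ofNat_eq_natCast]; omega,
          List.singleton_append]
    · rw [if_neg hc, if_neg hc, List.nil_append]

-- facts about runEndB (with enough fuel it is the genuine while loop)
theorem runEndB_ge (data : List Int) (t : Int) (s : Bool) :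
    ∀ fuel k, k ≤ runEndB data t s fuel k := by
  intro fuel
  induction fuel with
  | zero => intro k; exact Nat.le_refl k
  | succ fuel ih =>
    intro k
    show k ≤ (if k < data.length ∧ (decide (|data.getD k 0| > t) = s) then
        runEndB data t s fuel (k + 1) else k)
    split_ifs with h
    · exact Nat.le_trans (by omega) (ih (k + 1))
    · exact Nat.le_refl k

theorem runEndB_le (data : List Int) (t : Int) (s : Bool) :
    ∀ fuel k, k ≤ data.length → runEndB data t s fuel k ≤ data.length := by
  intro fuel
  induction fuel with
  | zero => intro k h; exact h
  | succ fuel ih =>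
    intro k h
    show (if k < data.length ∧ (decide (|data.getD k 0| > t) = s) then
        runEndB data t s fuel (k + 1) else k) ≤ data.length
    split_ifs with hc
    · exact ih (k + 1) (by omega)
    · exact h

theorem runEndB_run (data : List Int) (t : Int) (s : Bool) :
    ∀ fuel k, ∀ i, k ≤ i → i < runEndB data t s fuel k → abv data t i = s := by
  intro fuel
  induction fuel with
  | zero => intro k i h1 h2; rw [show runEndB data t s 0 k = k from rfl] at h2; omega
  | succ fuel ih =>
    intro k i h1 h2
    rw [show runEndB data t s (fuel + 1) k
        = (if k < data.length ∧ (decide (|data.getD k 0| > t) = s) then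
            runEndB data t s fuel (k + 1) else k) from rfl] at h2
    split_ifs at h2 with hc
    · rcases Nat.eq_or_lt_of_le h1 with h' | h'
      · subst h'; exact hc.2
      · exact ih (k + 1) i h' h2
    · omega

theorem runEndB_stop (data : List Int) (t : Int) (s : Bool) :
    ∀ fuel k, data.length ≤ fuel + k →
      runEndB data t s fuel k < data.length → abv data t (runEndB data t s fuel k) ≠ s := by
  intro fuel
  induction fuel with
  | zero => intro k hf h; rw [show runEndB data t s 0 k = k from rfl] at h; omega
  | succ fuel ih =>
    intro k hf h
    rw [show runEndB data t s (fuel + 1) k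
        = (if k < data.length ∧ (decide (|data.getD k 0| > t) = s) then
            runEndB data t s fuel (k + 1) else k) from rfl] at h ⊢
    split_ifs at h ⊢ with hc
    · exact ih (k + 1) (by omega) h
    · intro hs; exact hc ⟨h, hs⟩

-- runsB output list
def runsOut (data : List Int) (t : Int) (fuel j : Nat) : List Int :=
  ((runsB data t fuel j).dropLast.filter (fun r => r.1)).map (fun r => (r.2 : Int) - 1)

theorem runsB_nil (data : List Int) (t : Int) (fuel j : Nat) (h : data.length ≤ j) :
    runsB data t fuel j = [] := by
  cases fuel with
  | zero => rfl
  | succ fuel =>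
    show (if j < data.length then _ else []) = []
    rw [if_neg (by omega)]

-- B's runs invariant: with enough fuel, the output from any start j is the
-- falling-edge list from j
theorem runsOut_inv (data : List Int) (t : Int) :
    ∀ fuel j, data.length - j ≤ fuel → runsOut data t fuel j = edges data t j := by
  intro fuel
  induction fuel with
  | zero =>
    intro j hj
    unfold runsOut edges
    rw [runsB_nil data t 0 j (by omega)]
    simp [show data.length - 1 - j = 0 by omega]
  | succ fuel ih =>
    intro j hj
    by_cases hlt : j < data.length
    · have hs : runsB data t (fuel + 1) j
          = (decide (|data.getD j 0| > t),
             runEndB data t (decide (|data.getD j 0| > t)) data.length (j + 1))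
            :: runsB data t fuel
                 (runEndB data t (decide (|data.getD j 0| > t)) data.length (j + 1)) := by
        show (if j < data.length then _ else []) = _
        rw [if_pos hlt]
      set s := decide (|data.getD j 0| > t) with hsdef
      set k := runEndB data t s data.length (j + 1) with hkdef
      have hks : ∀ i, j ≤ i → i < k → abv data t i = s := by
        intro i h1 h2
        rcases Nat.eq_or_lt_of_le h1 with h' | h'
        · subst h'; exact hsdef.symm
        · exact runEndB_run data t s data.length (j + 1) i h' h2
      have hkj : j + 1 ≤ k := runEndB_ge data t s data.length (j + 1)
      have hkn : k ≤ data.length := runEndB_le data t s data.length (j + 1) (by omega)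
      by_cases hkend : data.length ≤ k
      · -- last run reaches the end: no edge from j on, output empty
        have hnil : runsB data t fuel k = [] := runsB_nil data t fuel k hkend
        unfold runsOut
        rw [hs, hnil, show ([((s : Bool), (k : Nat))] : List (Bool × Nat)).dropLast = [] from by simp]
        rw [List.filter_nil, List.map_nil]
        unfold edges
        rw [List.filter_eq_nil_iff.mpr, List.map_nil]
        intro m hm
        rw [List.mem_range'_1] at hm
        have h1 : abv data t m = s := hks m (by omega) (by omega)
        have h2 : abv data t (m + 1) = s := hks (m + 1) (by omega) (by omega)
        simp [h1, h2]
      · -- run ends at a status flip at k < n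
        rw [Nat.not_le] at hkend
        have hfuel : data.length - k ≤ fuel := by omega
        have hnonnil : runsB data t fuel k ≠ [] := by
          cases fuel with
          | zero => omega
          | succ fuel =>
            show (if k < data.length then _ else []) ≠ []
            rw [if_pos hkend]
            simp
        have hstop : abv data t k = !s := by
          have := runEndB_stop data t s data.length (j + 1) (by omega)
            (by rw [← hkdef] at *; omega)
          rw [← hkdef] at this
          rcases Bool.eq_false_or_eq_true s with h | h <;>
            rcases Bool.eq_false_or_eq_true (abv data t k) with h' | h' <;>
              simp_all
        have hrec : runsOut data t fuel k = edges data t k := ih k hfuel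
        unfold runsOut
        rw [hs, List.dropLast_cons_of_ne_nil hnonnil, List.filter_cons]
        have hsplit : edges data t j
            = ((List.range' j (k - 1 - j)).filter
                (fun m => abv data t m && !abv data t (m + 1))).map Int.ofNat
              ++ ((List.range' (k - 1) (data.length - 1 - (k - 1))).filter
                (fun m => abv data t m && !abv data t (m + 1))).map Int.ofNat := by
          unfold edges
          rw [← List.map_append, ← List.filter_append]
          have ha : List.range' (k - 1) (data.length - 1 - (k - 1))
              = List.range' (j + (k - 1 - j)) (data.length - 1 - (k - 1)) := by
            rw [show j + (k - 1 - j) = k - 1 from by omega]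
          rw [ha, List.range'_append_1]
          rw [show k - 1 - j + (data.length - 1 - (k - 1)) = data.length - 1 - j from by omega]
        have hfirst : (List.range' j (k - 1 - j)).filter
            (fun m => abv data t m && !abv data t (m + 1)) = [] := by
          rw [List.filter_eq_nil_iff]
          intro m hm
          rw [List.mem_range'_1] at hm
          have h1 : abv data t m = s := hks m (by omega) (by omega)
          have h2 : abv data t (m + 1) = s := hks (m + 1) (by omega) (by omega)
          simp [h1, h2]
        have hhead : List.range' (k - 1) (data.length - 1 - (k - 1))
            = (k - 1) :: List.range' k (data.length - 1 - k) := by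
          rw [show data.length - 1 - (k - 1) = (data.length - 1 - k) + 1 from by omega,
              List.range'_succ, show (k - 1) + 1 = k from by omega]
        have hkm1 : abv data t (k - 1) = s := hks (k - 1) (by omega) (by omega)
        rw [hsplit, hfirst, List.map_nil, List.nil_append, hhead, List.filter_cons]
        rw [show (k - 1) + 1 = k from by omega, hkm1, hstop]
        have hrec' := hrec
        unfold runsOut edges at hrec'
        rcases Bool.eq_false_or_eq_true s with hb | hb
        · rw [hb]
          simp [hrec']
          omega
        · rw [hb]
          simp [hrec']
    · unfold runsOut edges
      rw [runsB_nil data t (fuel + 1) j (by omega)]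
      simp [show data.length - 1 - j = 0 by omega]

-- ===== VERDICT (by name: the statement is the Claim_ definition above) =====
theorem find_peak_indices_spec : Claim_equal_find_peak_indices := by
  intro data t _
  show find_peak_indices data t = find_peak_indices_alt data t
  have hA : find_peak_indices data t
      = (loopAfrom data t 0 ([], false)).1 ++ [(data.length : Int) - 1] := rfl
  have hB : find_peak_indices_alt data t
      = runsOut data t data.length 0 ++ [(data.length : Int) - 1] := rfl
  rw [hA, hB]
  congr 1
  rcases Nat.eq_zero_or_pos data.length with h0 | hpos
  · unfold loopAfrom runsOut
    rw [runsB_nil data t data.length 0 (by omega),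
        PySem.List.pyRange_one_eq_nil (by rw [h0]; norm_num)]
    rfl
  · have h1 := loopAfrom_step data t 0 hpos [] false
    have h2 := loopAfrom_inv data t (data.length - 1) 1 [] (by omega) (by omega)
    rw [runsOut_inv data t data.length 0 (by omega)]
    rw [show (0 : Int) = ((0 : Nat) : Int) from by norm_num, h1]
    rw [show (((0 : Nat) : Int) + 1) = ((1 : Nat) : Int) from by norm_num]
    simp only [Bool.false_and]
    rw [if_neg (by simp), List.append_nil]
    rw [show abv data t 0 = abv data t (1 - 1) from rfl]
    rw [h2]
    simp
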